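-- pv_equiv track=rewrite | github.com/nspencerjackson/Advent-of-Code-2021 | Day_3/gamma.py | commonDigit
-- ===== SOURCE A (Python) =====
-- def swap(inFirst, inSecond):
--     ret = inSecond
--     return ret
--
-- def commonDigit(inArray, inRange, bitLoc, inDefault, coTwo):
--     val = []
--     countOne = 0
--     countZero = 0
--     for i in range(inRange):
--         tempV = inArray[i]
--         if tempV[bitLoc] == "1":
--             countOne += 1
--         else:
--             countZero += 1
--     if coTwo:
--         temp = countOne
--         countOne = swap(countOne, countZero)
--         countZero = swap(countZero, temp)
--     if countOne > countZero:
--         val = rating(inArray, inRange, bitLoc, 1)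
--     elif countOne < countZero:
--         val = rating(inArray, inRange, bitLoc, 0)
--     else:
--         val = rating(inArray, inRange, bitLoc, inDefault)
--     return val
--
-- def rating(inArray, inRange, bitLoc, inDigit):
--     tempArray = []
--     tempValue = ""
--     for i in range(inRange):
--         tempValue = inArray[i]
--         if int(tempValue[bitLoc]) == inDigit:
--             tempArray.append(tempValue)
--     return tempArray
-- ===== SOURCE B (Python) =====
-- def commonDigit(inArray, inRange, bitLoc, inDefault, coTwo):
--     # one pass: tag each entry with the int value of its bit, then bucket by that value
--     pairs = [(int(inArray[i][bitLoc]), inArray[i]) for i in range(inRange)]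
--     buckets = {}
--     for d, x in pairs:
--         buckets[d] = buckets.get(d, []) + [x]
--     countOne = len(buckets.get(1, []))
--     countZero = inRange - countOne
--     if coTwo:
--         countOne, countZero = countZero, countOne
--     if countOne > countZero:
--         digit = 1
--     elif countOne < countZero:
--         digit = 0
--     else:
--         digit = inDefault
--     return buckets.get(digit, [])
-- ===== Notes on version B (the rewrite author's own statement) =====
-- stated objective: alternative
-- what changed: Replaces A's count pass plus a separate rating rescan by a single pass that tags each entry with the int value of its bit and buckets entries by that value; countZero is derived as inRange - countOne and the answer is a single bucket lookup.
import Mathlib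
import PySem

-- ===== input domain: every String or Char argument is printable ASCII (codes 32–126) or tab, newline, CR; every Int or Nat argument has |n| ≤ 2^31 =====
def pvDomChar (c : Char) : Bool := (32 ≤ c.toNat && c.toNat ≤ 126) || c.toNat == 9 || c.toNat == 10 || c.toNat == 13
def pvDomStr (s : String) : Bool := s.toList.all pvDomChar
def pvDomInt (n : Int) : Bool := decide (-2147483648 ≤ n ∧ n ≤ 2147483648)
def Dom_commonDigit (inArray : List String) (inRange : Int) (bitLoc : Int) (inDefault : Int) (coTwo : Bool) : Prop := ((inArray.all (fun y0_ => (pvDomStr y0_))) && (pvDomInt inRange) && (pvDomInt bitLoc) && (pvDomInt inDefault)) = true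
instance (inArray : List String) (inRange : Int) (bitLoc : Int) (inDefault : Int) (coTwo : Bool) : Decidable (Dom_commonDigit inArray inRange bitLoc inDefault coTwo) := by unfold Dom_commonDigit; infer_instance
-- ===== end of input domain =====

-- B replaces A's count pass plus a separate rating rescan by a single tagging pass that
-- buckets the entries by the int value of their bit and derives countZero as inRange - countOne
-- (objective: alternative — a bucket index instead of count-then-rescan; same asymptotic cost).


-- ===== PORT A =====
def swapAB (inFirst inSecond : Int) : Int := inSecond

def ratingA (inArray : List String) (inRange : Int) (bitLoc : Int) (inDigit : Int) : List String :=
  (PySem.List.pyRange 0 inRange 1).foldl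
    (fun tempArray i =>
      let tempValue := (PySem.List.pyGet? inArray i).getD ""
      if (PySem.Int.ofChars? [(PySem.Str.pyGet? tempValue bitLoc).getD ' ']).getD (-1) = inDigit
      then tempArray ++ [tempValue] else tempArray) []

def commonDigit (inArray : List String) (inRange : Int) (bitLoc : Int) (inDefault : Int) (coTwo : Bool) : List String :=
  let counts := (PySem.List.pyRange 0 inRange 1).foldl
    (fun (c : Int × Int) i =>
      let tempV := (PySem.List.pyGet? inArray i).getD ""
      if PySem.Str.pyGet? tempV bitLoc = some '1' then (c.1 + 1, c.2) else (c.1, c.2 + 1))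
    (0, 0)
  let pair := if coTwo then (swapAB counts.1 counts.2, swapAB counts.2 counts.1) else counts
  if pair.1 > pair.2 then ratingA inArray inRange bitLoc 1
  else if pair.1 < pair.2 then ratingA inArray inRange bitLoc 0
  else ratingA inArray inRange bitLoc inDefault

-- ===== PORT B =====
def commonDigit_alt (inArray : List String) (inRange : Int) (bitLoc : Int) (inDefault : Int) (coTwo : Bool) : List String :=
  let pairs := (PySem.List.pyRange 0 inRange 1).map
    (fun i =>
      let x := (PySem.List.pyGet? inArray i).getD ""
      ((PySem.Int.ofChars? [(PySem.Str.pyGet? x bitLoc).getD ' ']).getD (-1), x))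
  let buckets : PySem.Dict Int (List String) :=
    pairs.foldl (fun d p => d.modify p.1 [] (· ++ [p.2])) PySem.Dict.empty
  let countOne : Int := (buckets.getD 1 []).length
  let countZero : Int := inRange - countOne
  let p := if coTwo then (countZero, countOne) else (countOne, countZero)
  let digit : Int := if p.1 > p.2 then 1 else if p.1 < p.2 then 0 else inDefault
  buckets.getD digit []

-- ===== PRECONDITION & SPEC =====
-- Pre_ = exactly the inputs where A returns: inRange many entries exist and each inspected
-- entry has a decimal digit at position bitLoc (otherwise A raises IndexError or ValueError).
def Pre_commonDigit (inArray : List String) (inRange : Int) (bitLoc : Int) (inDefault : Int) (coTwo : Bool) : Prop :=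
  inRange ≤ (inArray.length : Int) ∧
  (inArray.take inRange.toNat).all
    (fun s => ((PySem.Str.pyGet? s bitLoc).map Char.isDigit).getD false) = true
instance (inArray : List String) (inRange : Int) (bitLoc : Int) (inDefault : Int) (coTwo : Bool) : Decidable (Pre_commonDigit inArray inRange bitLoc inDefault coTwo) := by unfold Pre_commonDigit; infer_instance

def pvWitness_commonDigit : List String × Int × Int × Int × Bool := (["10", "11", "01"], 3, 0, 0, false)

def Spec_commonDigit (inArray : List String) (inRange : Int) (bitLoc : Int) (inDefault : Int) (coTwo : Bool) (out : List String) : Prop := out = commonDigit_alt inArray inRange bitLoc inDefault coTwo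
instance (inArray : List String) (inRange : Int) (bitLoc : Int) (inDefault : Int) (coTwo : Bool) (out : List String) : Decidable (Spec_commonDigit inArray inRange bitLoc inDefault coTwo out) := by unfold Spec_commonDigit; infer_instance

-- ===== CLAIM (what is proved, stated in full; the proofs are below) =====
def Claim_equal_commonDigit : Prop := ∀ (inArray : List String) (inRange : Int) (bitLoc : Int) (inDefault : Int) (coTwo : Bool), Dom_commonDigit inArray inRange bitLoc inDefault coTwo → Pre_commonDigit inArray inRange bitLoc inDefault coTwo → Spec_commonDigit inArray inRange bitLoc inDefault coTwo (commonDigit inArray inRange bitLoc inDefault coTwo)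

-- ===== LEMMAS AND PROOFS =====

lemma digit_cases (c : Char) (h : c.isDigit = true) : c ∈ ['0','1','2','3','4','5','6','7','8','9'] := by
  simp only [Char.isDigit, decide_eq_true_eq, Bool.and_eq_true] at h
  have h1 : 48 ≤ c.toNat := h.1
  have h2 : c.toNat ≤ 57 := h.2
  interval_cases hx : c.toNat <;>
    (rw [← Char.ofNat_toNat c, hx]; decide)

lemma ofChars_digit (c : Char) (h : c.isDigit = true) :
    PySem.Int.ofChars? [c] = some ((c.toNat : Int) - 48) := by
  have hm := digit_cases c h
  fin_cases hm <;> decide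

lemma char_eq_of_toNat (c d : Char) (h : c.toNat = d.toNat) : c = d := by
  rw [← Char.ofNat_toNat c, h, Char.ofNat_toNat]

lemma pre_elem (inArray : List String) (inRange bitLoc : Int)
    (hlen : inRange ≤ (inArray.length : Int))
    (hall : (inArray.take inRange.toNat).all
      (fun s => ((PySem.Str.pyGet? s bitLoc).map Char.isDigit).getD false) = true)
    {i : Int} (hi : i ∈ PySem.List.pyRange 0 inRange 1) :
    ∃ c : Char, PySem.Str.pyGet? ((PySem.List.pyGet? inArray i).getD "") bitLoc = some c
      ∧ c.isDigit = true := by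
  rcases PySem.List.mem_pyRange_one.mp hi with ⟨h0, h1⟩
  have hilt : i < (inArray.length : Int) := lt_of_lt_of_le h1 hlen
  rw [PySem.List.pyGet?_eq_some_getElem inArray h0 hilt]
  simp only [Option.getD_some]
  have hlt2 : i.toNat < inArray.length := by omega
  have hmem : inArray[i.toNat] ∈ inArray.take inRange.toNat := by
    have hlt : i.toNat < (inArray.take inRange.toNat).length := by
      simp [List.length_take]; omega
    have hg : (inArray.take inRange.toNat)[i.toNat]'hlt = inArray[i.toNat] := by
      simp [List.getElem_take]
    rw [← hg]
    exact List.getElem_mem hlt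
  have hp := (List.all_eq_true.mp hall) _ hmem
  cases hc : PySem.Str.pyGet? inArray[i.toNat] bitLoc with
  | none => rw [hc] at hp; simp at hp
  | some c => rw [hc] at hp; simp at hp; exact ⟨c, rfl, hp⟩

-- A's rating loop as filter+map over the range
lemma rating_filter (inArray : List String) (inRange bitLoc d : Int) :
    ratingA inArray inRange bitLoc d =
      ((PySem.List.pyRange 0 inRange 1).filter
        (fun i => decide ((PySem.Int.ofChars? [(PySem.Str.pyGet? ((PySem.List.pyGet? inArray i).getD "") bitLoc).getD ' ']).getD (-1) = d))).map
        (fun i => (PySem.List.pyGet? inArray i).getD "") := by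
  rw [ratingA, PySem.List.foldl_append_ite
    (p := fun i => (PySem.Int.ofChars? [(PySem.Str.pyGet? ((PySem.List.pyGet? inArray i).getD "") bitLoc).getD ' ']).getD (-1) = d)
    (f := fun i => (PySem.List.pyGet? inArray i).getD "")]
  simp

-- B's bucket lookup = A's rating, for every digit (no precondition needed)
lemma bucket_eq_rating (inArray : List String) (inRange bitLoc dgt : Int) :
    (((PySem.List.pyRange 0 inRange 1).map
        (fun i =>
          let x := (PySem.List.pyGet? inArray i).getD ""
          ((PySem.Int.ofChars? [(PySem.Str.pyGet? x bitLoc).getD ' ']).getD (-1), x))).foldl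
        (fun d p => d.modify p.1 [] (· ++ [p.2])) PySem.Dict.empty).getD dgt []
      = ratingA inArray inRange bitLoc dgt := by
  rw [PySem.Dict.getD_foldl_modify_append]
  rw [ratingA, PySem.List.foldl_append_ite
    (p := fun i => (PySem.Int.ofChars? [(PySem.Str.pyGet? ((PySem.List.pyGet? inArray i).getD "") bitLoc).getD ' ']).getD (-1) = dgt)
    (f := fun i => (PySem.List.pyGet? inArray i).getD "")]
  simp [List.filter_map, List.map_map, Function.comp_def, Bool.beq_eq_decide_eq]
  rfl

-- A's counting loop = two countP's over the range
lemma counts_eq (inArray : List String) (inRange bitLoc : Int) :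
    (PySem.List.pyRange 0 inRange 1).foldl
      (fun (c : Int × Int) i =>
        let tempV := (PySem.List.pyGet? inArray i).getD ""
        if PySem.Str.pyGet? tempV bitLoc = some '1' then (c.1 + 1, c.2) else (c.1, c.2 + 1))
      (0, 0)
    = (((PySem.List.pyRange 0 inRange 1).countP
          (fun i => decide (PySem.Str.pyGet? ((PySem.List.pyGet? inArray i).getD "") bitLoc = some '1')) : Int),
       ((PySem.List.pyRange 0 inRange 1).countP
          (fun i => decide ¬(PySem.Str.pyGet? ((PySem.List.pyGet? inArray i).getD "") bitLoc = some '1')) : Int)) := by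
  rw [PySem.List.foldl_congr_mem _ _
    (fun c i => ((if PySem.Str.pyGet? ((PySem.List.pyGet? inArray i).getD "") bitLoc = some '1' then c.1 + 1 else c.1),
                 (if ¬ PySem.Str.pyGet? ((PySem.List.pyGet? inArray i).getD "") bitLoc = some '1' then c.2 + 1 else c.2)))
    _ (by intro acc x _; simp only []; split_ifs <;> simp_all)]
  rw [PySem.List.foldl_prod_mk
    (f := fun a i => if PySem.Str.pyGet? ((PySem.List.pyGet? inArray i).getD "") bitLoc = some '1' then a + 1 else a)
    (g := fun a i => if ¬ PySem.Str.pyGet? ((PySem.List.pyGet? inArray i).getD "") bitLoc = some '1' then a + 1 else a)]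
  rw [PySem.List.foldl_ite_add_one, PySem.List.foldl_ite_add_one]
  simp

-- under Pre_, the bucket key test "int value = 1" is A's character test "char = '1'"
lemma hkey_lem (inArray : List String) (inRange bitLoc : Int)
    (hlen : inRange ≤ (inArray.length : Int))
    (hall : (inArray.take inRange.toNat).all
      (fun s => ((PySem.Str.pyGet? s bitLoc).map Char.isDigit).getD false) = true) :
    ∀ i ∈ PySem.List.pyRange 0 inRange 1,
      (decide ((PySem.Int.ofChars? [(PySem.Str.pyGet? ((PySem.List.pyGet? inArray i).getD "") bitLoc).getD ' ']).getD (-1) = (1 : Int)))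
      = decide (PySem.Str.pyGet? ((PySem.List.pyGet? inArray i).getD "") bitLoc = some '1') := by
  intro i hi
  obtain ⟨c, hc, hd⟩ := pre_elem inArray inRange bitLoc hlen hall hi
  rw [hc]
  simp only [Option.getD_some, ofChars_digit c hd, decide_eq_decide, Option.some_inj]
  constructor
  · intro h
    have h49 : c.toNat = 49 := by omega
    exact char_eq_of_toNat c '1' (by rw [h49]; rfl)
  · rintro rfl
    decide

-- ===== VERDICT (by name: the statement is the Claim_ definition above) =====
theorem commonDigit_spec : Claim_equal_commonDigit := by
  intro inArray inRange bitLoc inDefault coTwo _ hpre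
  obtain ⟨hlen, hall⟩ := hpre
  unfold Spec_commonDigit commonDigit commonDigit_alt
  rcases Int.lt_or_le inRange 0 with hneg | hpos
  · simp only [PySem.List.pyRange_one_eq_nil hneg.le, List.map_nil, List.foldl_nil, ratingA,
      PySem.Dict.getD_empty]
    split_ifs <;> rfl
  · simp only [counts_eq, bucket_eq_rating]
    have e1 : ((ratingA inArray inRange bitLoc 1).length : Int)
        = ((PySem.List.pyRange 0 inRange 1).countP
            (fun i => decide (PySem.Str.pyGet? ((PySem.List.pyGet? inArray i).getD "") bitLoc = some '1')) : Int) := by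
      rw [rating_filter, List.length_map, ← List.countP_eq_length_filter,
        List.countP_congr (fun x hx => by rw [hkey_lem inArray inRange bitLoc hlen hall x hx])]
    have e2 : (((PySem.List.pyRange 0 inRange 1).countP
            (fun i => decide ¬(PySem.Str.pyGet? ((PySem.List.pyGet? inArray i).getD "") bitLoc = some '1'))) : Int)
        = inRange - ((PySem.List.pyRange 0 inRange 1).countP
            (fun i => decide (PySem.Str.pyGet? ((PySem.List.pyGet? inArray i).getD "") bitLoc = some '1')) : Int) := by
      have hsum := List.length_eq_countP_add_countP
        (fun i => decide (PySem.Str.pyGet? ((PySem.List.pyGet? inArray i).getD "") bitLoc = some '1'))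
        (l := PySem.List.pyRange 0 inRange 1)
      have hcongr : (PySem.List.pyRange 0 inRange 1).countP
          (fun i => decide ¬(PySem.Str.pyGet? ((PySem.List.pyGet? inArray i).getD "") bitLoc = some '1'))
        = (PySem.List.pyRange 0 inRange 1).countP
          (fun a => decide ¬decide (PySem.Str.pyGet? ((PySem.List.pyGet? inArray a).getD "") bitLoc = some '1') = true) := by
        apply List.countP_congr
        intro x _
        simp
      have hlenr : (PySem.List.pyRange 0 inRange 1).length = inRange.toNat := by
        rw [PySem.List.length_pyRange_one]
        omega
      rw [hcongr]
      omega
    rw [e1, e2]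
    cases coTwo <;> simp only [swapAB, reduceIte, Bool.false_eq_true] <;>
      split_ifs <;> rfl
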